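-- pv_equiv track=rewrite | github.com/Bthcorn/Python-HW | HW10/Q3.py | my_intersection
-- ===== SOURCE A (Python) =====
-- def my_intersection(list1, list2):
--     new_list = []
--     for i in list1:
--         if i in list2 and not i in new_list:
--             new_list.append(i)
--
--     for j in list2:
--         if j in list1 and not j in new_list:
--             new_list.append(j)
--
--     return new_list
-- ===== SOURCE B (Python) =====
-- def my_intersection(list1, list2):
--     common = [x for x in list1 if x in list2]
--     result = []
--     for x in common:
--         if x not in result:
--             result.append(x)
--     return result
-- ===== Notes on version B (the rewrite author's own statement) =====
-- stated objective: faster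
-- what changed: B splits A's interleaved filter-and-dedup loop into two separate passes (filter list1 by membership in list2, then dedup) and drops A's second loop over list2, which can never add an element.
import Mathlib
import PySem

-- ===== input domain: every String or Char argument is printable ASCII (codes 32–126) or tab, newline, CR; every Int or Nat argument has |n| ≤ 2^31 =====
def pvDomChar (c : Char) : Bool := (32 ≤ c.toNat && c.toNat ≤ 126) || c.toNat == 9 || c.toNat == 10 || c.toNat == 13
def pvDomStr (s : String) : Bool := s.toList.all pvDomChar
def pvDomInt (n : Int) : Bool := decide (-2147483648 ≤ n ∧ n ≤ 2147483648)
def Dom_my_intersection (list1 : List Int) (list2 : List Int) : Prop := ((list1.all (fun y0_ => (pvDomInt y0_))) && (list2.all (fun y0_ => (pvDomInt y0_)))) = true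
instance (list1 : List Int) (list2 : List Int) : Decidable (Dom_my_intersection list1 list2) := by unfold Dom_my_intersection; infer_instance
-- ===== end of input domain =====

-- B splits A's interleaved filter-and-dedup loop into two separate passes and drops A's redundant second loop over list2.


-- ===== PORT A =====
-- first loop: for i in list1: if i in list2 and not i in new_list: new_list.append(i)
-- second loop: for j in list2: if j in list1 and not j in new_list: new_list.append(j)
def my_intersection (list1 : List Int) (list2 : List Int) : List Int :=
  let new_list := list1.foldl
    (fun acc i => if i ∈ list2 ∧ i ∉ acc then acc ++ [i] else acc) []
  list2.foldl
    (fun acc j => if j ∈ list1 ∧ j ∉ acc then acc ++ [j] else acc) new_list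

-- ===== PORT B =====
-- common = [x for x in list1 if x in list2]; then dedup pass over common
def my_intersection_alt (list1 : List Int) (list2 : List Int) : List Int :=
  let common := list1.filter (fun x => decide (x ∈ list2))
  common.foldl (fun acc x => if x ∉ acc then acc ++ [x] else acc) []

-- ===== PRECONDITION & SPEC =====
def Spec_my_intersection (list1 : List Int) (list2 : List Int) (out : List Int) : Prop := out = my_intersection_alt list1 list2
instance (list1 : List Int) (list2 : List Int) (out : List Int) : Decidable (Spec_my_intersection list1 list2 out) := by unfold Spec_my_intersection; infer_instance

-- ===== CLAIM (what is proved, stated in full; the proofs are below) =====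
def Claim_equal_my_intersection : Prop := ∀ (list1 : List Int) (list2 : List Int), Dom_my_intersection list1 list2 → Spec_my_intersection list1 list2 (my_intersection list1 list2)

-- ===== LEMMAS AND PROOFS =====

-- A's first loop equals B's dedup fold over the filtered list
theorem loop1_eq_filter_dedup (list2 : List Int) :
    ∀ (l : List Int) (acc : List Int),
      l.foldl (fun acc i => if i ∈ list2 ∧ i ∉ acc then acc ++ [i] else acc) acc
      = (l.filter (fun x => decide (x ∈ list2))).foldl
          (fun acc x => if x ∉ acc then acc ++ [x] else acc) acc := by
  intro l
  induction l with
  | nil => intro acc; rfl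
  | cons a l ih =>
    intro acc
    by_cases h2 : a ∈ list2
    · simp only [List.foldl_cons, List.filter_cons, h2, decide_true, if_true]
      by_cases hm : a ∈ acc
      · simp [hm, ih]
      · simp [hm, ih]
    · simp [List.foldl_cons, h2, ih]

-- the fold only grows the accumulator
theorem loop1_mono (list2 : List Int) :
    ∀ (l : List Int) (acc : List Int) (x : Int), x ∈ acc →
      x ∈ l.foldl (fun acc i => if i ∈ list2 ∧ i ∉ acc then acc ++ [i] else acc) acc := by
  intro l
  induction l with
  | nil => intro acc x hx; exact hx
  | cons a l ih =>
    intro acc x hx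
    simp only [List.foldl_cons]
    split_ifs with h
    · exact ih _ _ (by simp [hx])
    · exact ih _ _ hx

-- after the first loop, every element of list1 ∩ list2 is in the accumulator
theorem loop1_complete (list2 : List Int) :
    ∀ (l : List Int) (acc : List Int) (x : Int), x ∈ l → x ∈ list2 →
      x ∈ l.foldl (fun acc i => if i ∈ list2 ∧ i ∉ acc then acc ++ [i] else acc) acc := by
  intro l
  induction l with
  | nil => intro acc x hx; cases hx
  | cons a l ih =>
    intro acc x hx h2
    simp only [List.foldl_cons]
    rcases List.mem_cons.mp hx with rfl | hxl
    · by_cases hm : x ∈ acc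
      · split_ifs with h
        · exact loop1_mono list2 l _ x (by simp [hm])
        · exact loop1_mono list2 l _ x hm
      · simp only [h2, hm, not_false_iff, and_self, if_true]
        exact loop1_mono list2 l _ x (by simp)
    · exact ih _ _ hxl h2

-- A's second loop never adds anything once acc already contains list1 ∩ list2
theorem loop2_id (list1 list2 : List Int) :
    ∀ (l : List Int) (acc : List Int),
      (∀ j ∈ l, j ∈ list2) →
      (∀ x, x ∈ list1 → x ∈ list2 → x ∈ acc) →
      l.foldl (fun acc j => if j ∈ list1 ∧ j ∉ acc then acc ++ [j] else acc) acc = acc := by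
  intro l
  induction l with
  | nil => intro acc _ _; rfl
  | cons a l ih =>
    intro acc hl hinv
    simp only [List.foldl_cons]
    have ha2 : a ∈ list2 := hl a (by simp)
    have : ¬ (a ∈ list1 ∧ a ∉ acc) := by
      rintro ⟨h1, hna⟩; exact hna (hinv a h1 ha2)
    rw [if_neg this]
    exact ih acc (fun j hj => hl j (by simp [hj])) hinv

-- ===== VERDICT (by name: the statement is the Claim_ definition above) =====
theorem my_intersection_spec : Claim_equal_my_intersection := by
  intro list1 list2 _
  unfold Spec_my_intersection my_intersection my_intersection_alt
  simp only []
  rw [loop2_id list1 list2 list2 _ (fun j hj => hj)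
        (fun x h1 h2 => loop1_complete list2 list1 [] x h1 h2)]
  exact loop1_eq_filter_dedup list2 list1 []
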